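-- pv_equiv track=rewrite | github.com/11235andrew/caller | relatives.py | get_count_of_ancestors
-- ===== SOURCE A (Python) =====
-- def get_count_of_ancestors(name,  family):
--     if name == '0' or name not in family:
--         return 0
--     else:
--         count = 1
--         count += get_count_of_ancestors(family[name]['father'],  family)
--         count += get_count_of_ancestors(family[name]['mother'],  family)
--         return count
-- ===== SOURCE B (Python) =====
-- def get_count_of_ancestors(name, family):
--     # Bottom-up instead of A's top-down recursion: first collect the keys
--     # reachable from `name` by set fixed-point passes, then fill a count table
--     # over that set by Bellman-Ford style relaxation passes, then one lookup.
--     reach = {name} if name != '0' and name in family else set()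
--     for _ in range(len(family)):
--         prev = set(reach)
--         for k in family:
--             if k in reach:
--                 rec = family[k]
--                 for q in (rec.get('father', '0'), rec.get('mother', '0')):
--                     if q != '0' and q in family:
--                         reach.add(q)
--         if reach == prev:
--             break
--     cnt = {}
--     for _ in range(len(reach)):
--         prev = dict(cnt)
--         for k in family:
--             if k in reach:
--                 rec = family[k]
--                 f = rec.get('father', '0')
--                 m = rec.get('mother', '0')
--                 cnt[k] = 1 + (cnt.get(f, 0) if f != '0' else 0) \
--                            + (cnt.get(m, 0) if m != '0' else 0)
--         if cnt == prev:
--             break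
--     return 0 if name == '0' else cnt.get(name, 0)
-- ===== Notes on version B (the rewrite author's own statement) =====
-- stated objective: alternative
-- what changed: B replaces A's top-down recursion by bottom-up dynamic programming: it first collects the keys reachable from name with set fixed-point passes, then fills a count table over them by Bellman-Ford style relaxation passes (stopping when the table stops changing), then does one lookup; A instead recomputes a shared ancestor once per path, which is exponential on adversarial shared-ancestor DAGs.
import Mathlib
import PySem

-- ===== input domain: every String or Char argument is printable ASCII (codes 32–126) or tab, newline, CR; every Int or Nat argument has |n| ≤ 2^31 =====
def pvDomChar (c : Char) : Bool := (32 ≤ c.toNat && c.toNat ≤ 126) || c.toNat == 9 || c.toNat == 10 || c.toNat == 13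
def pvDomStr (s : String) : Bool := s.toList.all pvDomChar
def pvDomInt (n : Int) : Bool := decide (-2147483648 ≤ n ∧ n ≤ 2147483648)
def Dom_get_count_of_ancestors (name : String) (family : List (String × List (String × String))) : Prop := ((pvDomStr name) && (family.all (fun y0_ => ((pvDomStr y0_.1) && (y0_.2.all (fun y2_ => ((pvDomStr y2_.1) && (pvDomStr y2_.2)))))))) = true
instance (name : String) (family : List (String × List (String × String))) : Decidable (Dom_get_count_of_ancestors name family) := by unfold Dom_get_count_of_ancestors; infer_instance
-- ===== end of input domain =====

-- B replaces A's top-down recursion by bottom-up table filling: it collects the reachable keys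
-- with set fixed-point passes and then fills a count table by relaxation passes over them.

-- ===== PORT A =====
-- A's recursion, made total with a fuel argument; under Pre_ (acyclic reachable part) the
-- recursion depth is at most family.length + 1, so the chosen fuel never runs out.
def pvGoA (family : List (String × List (String × String))) : Nat → String → Int
  | 0, _ => 0
  | fuel+1, name =>
    if name = "0" then 0 else
    match (PySem.Dict.mk family).get? name with
    | none => 0
    | some v =>
      1 + pvGoA family fuel (((PySem.Dict.mk v).get? "father").getD "0")
        + pvGoA family fuel (((PySem.Dict.mk v).get? "mother").getD "0")

def get_count_of_ancestors (name : String) (family : List (String × List (String × String))) : Int :=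
  pvGoA family (family.length + 1) name

-- ===== PORT B =====
-- the dict's key list in order ('for k in family'): first occurrences, deduplicated
def pvKeysD (family : List (String × List (String × String))) : List String :=
  PySem.List.dedup (family.map Prod.fst)

-- 'prev = copy; <one pass>; if <unchanged>: break' — break encoded as a done flag
def pvBreakStep {α : Type} [DecidableEq α] (f : α → α) (st : α × Bool) : α × Bool :=
  if st.2 then st else
    let c' := f st.1
    if c' = st.1 then (st.1, true) else (c', false)

-- body of the reachability pass for one key k:
-- 'if k in reach: for q in (rec.get(...), rec.get(...)): if q != '0' and q in family: reach.add(q)'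
def pvRUpd (family : List (String × List (String × String)))
    (R : List String) (k : String) : List String :=
  if k ∈ R then
    [((PySem.Dict.mk (((PySem.Dict.mk family).get? k).getD [])).get? "father").getD "0",
     ((PySem.Dict.mk (((PySem.Dict.mk family).get? k).getD [])).get? "mother").getD "0"].foldl
      (fun R q => if q ≠ "0" ∧ (PySem.Dict.mk family).contains q then PySem.Set.add R q else R) R
  else R

def pvRPass (family : List (String × List (String × String))) (R : List String) : List String :=
  (pvKeysD family).foldl (pvRUpd family) R

-- 'reach = {name} if name != '0' and name in family else set()'
def pvSeed (name : String) (family : List (String × List (String × String))) : List String :=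
  if name ≠ "0" ∧ (PySem.Dict.mk family).contains name then [name] else []

def pvReachB (name : String) (family : List (String × List (String × String))) : List String :=
  ((PySem.List.pyRange 0 ((pvKeysD family).length : Int) 1).foldl
    (fun st _ => pvBreakStep (pvRPass family) st) (pvSeed name family, false)).1

-- body of the counting pass for one key k (inside 'if k in reach'):
-- cnt[k] = 1 + (cnt.get(f,0) if f!='0' else 0) + (cnt.get(m,0) if m!='0' else 0)
def pvUpd (family : List (String × List (String × String)))
    (cnt : PySem.Dict String Int) (k : String) : PySem.Dict String Int :=
  let r := ((PySem.Dict.mk family).get? k).getD []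
  let f := ((PySem.Dict.mk r).get? "father").getD "0"
  let m := ((PySem.Dict.mk r).get? "mother").getD "0"
  cnt.insert k (1 + (if f ≠ "0" then cnt.getD f 0 else 0)
                  + (if m ≠ "0" then cnt.getD m 0 else 0))

def pvCPass (family : List (String × List (String × String))) (R : List String)
    (cnt : PySem.Dict String Int) : PySem.Dict String Int :=
  (pvKeysD family).foldl (fun c k => if k ∈ R then pvUpd family c k else c) cnt

def get_count_of_ancestors_alt (name : String) (family : List (String × List (String × String))) : Int :=
  let R := pvReachB name family
  let cnt := ((PySem.List.pyRange 0 (R.length : Int) 1).foldl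
    (fun st _ => pvBreakStep (pvCPass family R) st) (PySem.Dict.empty, false)).1
  if name = "0" then 0 else cnt.getD name 0

-- ===== PRECONDITION & SPEC =====
-- Graph vocabulary for the precondition: the persons the recursion can visit from `name`,
-- computed as plain saturating graph reachability (parents of a person; '0' is terminal).
def pvParents (family : List (String × List (String × String))) (x : String) : List String :=
  if x = "0" then [] else
  match (PySem.Dict.mk family).get? x with
  | none => []
  | some v => [((PySem.Dict.mk v).get? "father").getD "0",
               ((PySem.Dict.mk v).get? "mother").getD "0"]

def pvParF (family : List (String × List (String × String))) (x : String) : Finset String :=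
  (pvParents family x).toFinset

def pvExpand (family : List (String × List (String × String))) (S : Finset String) : Finset String :=
  S ∪ S.biUnion (pvParF family)

def pvN (family : List (String × List (String × String))) : Nat := 2 * family.length + 4

def pvReach (family : List (String × List (String × String))) (S0 : Finset String) : Finset String :=
  (pvExpand family)^[pvN family] S0

-- Pre_ excludes exactly the inputs on which the Python A raises: a reachable person whose record
-- lacks a 'father' or 'mother' key (KeyError), or a reachable ancestor cycle (RecursionError).
def Pre_get_count_of_ancestors (name : String) (family : List (String × List (String × String))) : Prop :=
  ∀ x ∈ pvReach family {name}, x = "0" ∨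
    ((((PySem.Dict.mk family).get? x).all
      (fun v => ((PySem.Dict.mk v).get? "father").isSome && ((PySem.Dict.mk v).get? "mother").isSome)) = true
    ∧ x ∉ pvReach family (pvParF family x))

instance (name : String) (family : List (String × List (String × String))) : Decidable (Pre_get_count_of_ancestors name family) := by
  unfold Pre_get_count_of_ancestors; infer_instance

def pvWitness_get_count_of_ancestors : String × (List (String × List (String × String))) :=
  ("a", [("a", [("father", "0"), ("mother", "b")]), ("b", [("father", "0"), ("mother", "0")])])

def Spec_get_count_of_ancestors (name : String) (family : List (String × List (String × String))) (out : Int) : Prop := out = get_count_of_ancestors_alt name family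
instance (name : String) (family : List (String × List (String × String))) (out : Int) : Decidable (Spec_get_count_of_ancestors name family out) := by unfold Spec_get_count_of_ancestors; infer_instance

-- ===== CLAIM (what is proved, stated in full; the proofs are below) =====
def Claim_equal_get_count_of_ancestors : Prop := ∀ (name : String) (family : List (String × List (String × String))), Dom_get_count_of_ancestors name family → Pre_get_count_of_ancestors name family → Spec_get_count_of_ancestors name family (get_count_of_ancestors name family)

-- ===== LEMMAS AND PROOFS =====

-- proof-only helpers
def pvKeyF (family : List (String × List (String × String))) : Finset String :=
  (family.map Prod.fst).toFinset

def pvPool (family : List (String × List (String × String))) : Finset String :=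
  (family.flatMap (fun kv => [((PySem.Dict.mk kv.2).get? "father").getD "0",
                              ((PySem.Dict.mk kv.2).get? "mother").getD "0"])).toFinset

-- measure: reachable keys other than '0'
def pvM (family : List (String × List (String × String))) (x : String) : Nat :=
  ((pvReach family {x} ∩ pvKeyF family).erase "0").card

-- cnt has no entries outside the family's keys
def pvNK (family : List (String × List (String × String))) (cnt : PySem.Dict String Int) : Prop :=
  ∀ x, (PySem.Dict.mk family).get? x = none → cnt.get? x = none

-- cnt agrees with A's count on every reachable person of measure ≤ p
def pvGood (name : String) (family : List (String × List (String × String))) (p : Nat)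
    (cnt : PySem.Dict String Int) : Prop :=
  ∀ x ∈ pvReach family {name}, x ≠ "0" → pvM family x ≤ p →
    cnt.getD x 0 = pvGoA family (family.length + 1) x

-- invariant of one counting pass, `l` = keys still to process in this pass
def pvInv (name : String) (family : List (String × List (String × String))) (p : Nat)
    (cnt : PySem.Dict String Int) (l : List String) : Prop :=
  pvNK family cnt ∧ pvGood name family p cnt ∧
  ∀ x ∈ pvReach family {name}, x ≠ "0" → pvM family x ≤ p + 1 → x ∉ l →
    cnt.getD x 0 = pvGoA family (family.length + 1) x

-- well-formedness of the reachable-key set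
def pvROk (family : List (String × List (String × String))) (R : List String) : Prop :=
  R.Nodup ∧ ∀ x ∈ R, x ≠ "0" ∧ x ∈ family.map Prod.fst

lemma pvParF_subset_pool (family : List (String × List (String × String))) (x : String) :
    pvParF family x ⊆ pvPool family := by
  intro y hy
  rw [pvParF, List.mem_toFinset] at hy
  unfold pvParents at hy
  split at hy
  · simp at hy
  · cases hv : (PySem.Dict.mk family).get? x with
    | none => rw [hv] at hy; simp at hy
    | some v =>
      rw [hv] at hy
      have hmem : (x, v) ∈ family := PySem.Dict.mem_items_of_get?_eq_some _ hv
      rw [pvPool, List.mem_toFinset]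
      exact List.mem_flatMap.mpr ⟨(x, v), hmem, hy⟩

lemma pvExpand_progressive (family : List (String × List (String × String))) (S : Finset String) :
    S ⊆ pvExpand family S := Finset.subset_union_left

lemma pvExpand_mono (family : List (String × List (String × String))) {S T : Finset String}
    (h : S ⊆ T) : pvExpand family S ⊆ pvExpand family T :=
  Finset.union_subset_union h (Finset.biUnion_subset_biUnion_of_subset_left _ h)

lemma pvExpand_bounded (family : List (String × List (String × String))) {S T : Finset String}
    (h : S ⊆ T ∪ pvPool family) : pvExpand family S ⊆ T ∪ pvPool family := by
  refine Finset.union_subset h ?_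
  intro y hy
  rw [Finset.mem_biUnion] at hy
  obtain ⟨z, _, hy⟩ := hy
  exact Finset.mem_union_right _ (pvParF_subset_pool family z hy)

lemma pvIter_bounded (family : List (String × List (String × String))) (S0 : Finset String) :
    ∀ k, (pvExpand family)^[k] S0 ⊆ S0 ∪ pvPool family := by
  intro k
  induction k with
  | zero => exact Finset.subset_union_left
  | succ k IH =>
    rw [Function.iterate_succ_apply']
    exact pvExpand_bounded family IH

lemma pvIter_progressive (family : List (String × List (String × String))) (S0 : Finset String) :
    ∀ k, S0 ⊆ (pvExpand family)^[k] S0 := by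
  intro k
  induction k with
  | zero => exact subset_rfl
  | succ k IH =>
    rw [Function.iterate_succ_apply']
    exact IH.trans (pvExpand_progressive family _)

lemma pvIter_mono (family : List (String × List (String × String))) {S0 T0 : Finset String}
    (h : S0 ⊆ T0) : ∀ k, (pvExpand family)^[k] S0 ⊆ (pvExpand family)^[k] T0 := by
  intro k
  induction k with
  | zero => exact h
  | succ k IH =>
    rw [Function.iterate_succ_apply', Function.iterate_succ_apply']
    exact pvExpand_mono family IH

lemma pvPool_card (family : List (String × List (String × String))) :
    (pvPool family).card ≤ 2 * family.length := by
  refine (List.toFinset_card_le _).trans ?_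
  induction family with
  | nil => simp
  | cons kv rest IH => simp only [List.flatMap_cons, List.length_append, List.length_cons,
      List.length_nil]; omega

lemma pvGrow (family : List (String × List (String × String))) (S0 : Finset String) :
    ∀ k, pvExpand family ((pvExpand family)^[k] S0) = (pvExpand family)^[k] S0 ∨
      S0.card + k ≤ ((pvExpand family)^[k] S0).card := by
  intro k
  induction k with
  | zero => right; simp
  | succ k IH =>
    rcases IH with h | h
    · left; rw [Function.iterate_succ_apply', h, h]
    · by_cases hf : pvExpand family ((pvExpand family)^[k] S0) = (pvExpand family)^[k] S0
      · left; rw [Function.iterate_succ_apply', hf, hf]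
      · right
        have hlt : ((pvExpand family)^[k] S0).card < (pvExpand family ((pvExpand family)^[k] S0)).card := by
          refine Finset.card_lt_card (Finset.ssubset_iff_subset_ne.mpr ⟨pvExpand_progressive _ _, ?_⟩)
          exact fun he => hf he.symm
        rw [Function.iterate_succ_apply']
        omega

lemma pvSaturated (family : List (String × List (String × String))) (S0 : Finset String) :
    pvExpand family (pvReach family S0) = pvReach family S0 := by
  rcases pvGrow family S0 (pvN family) with h | h
  · exact h
  · exfalso
    have hb := pvIter_bounded family S0 (pvN family)
    have h1 : ((pvExpand family)^[pvN family] S0).card ≤ (S0 ∪ pvPool family).card :=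
      Finset.card_le_card hb
    have h2 : (S0 ∪ pvPool family).card ≤ S0.card + (pvPool family).card :=
      Finset.card_union_le _ _
    have h3 := pvPool_card family
    have hN : pvN family = 2 * family.length + 4 := rfl
    omega

lemma pvReach_self (family : List (String × List (String × String))) (S0 : Finset String) :
    S0 ⊆ pvReach family S0 := pvIter_progressive family S0 _

lemma pvReach_mono (family : List (String × List (String × String))) {S0 T0 : Finset String}
    (h : S0 ⊆ T0) : pvReach family S0 ⊆ pvReach family T0 := pvIter_mono family h _

lemma pvReach_expand (family : List (String × List (String × String))) (S0 : Finset String) :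
    pvReach family (pvExpand family S0) = pvReach family S0 := by
  unfold pvReach
  calc (pvExpand family)^[pvN family] (pvExpand family S0)
      = (pvExpand family)^[pvN family + 1] S0 := (Function.iterate_succ_apply _ _ _).symm
    _ = pvExpand family ((pvExpand family)^[pvN family] S0) := Function.iterate_succ_apply' _ _ _
    _ = (pvExpand family)^[pvN family] S0 := pvSaturated family S0

lemma pvParF_subset_reach (family : List (String × List (String × String))) {S0 : Finset String}
    {x : String} (hx : x ∈ pvReach family S0) : pvParF family x ⊆ pvReach family S0 := by
  have h1 : pvParF family x ⊆ pvExpand family (pvReach family S0) :=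
    (Finset.subset_biUnion_of_mem (pvParF family) hx).trans Finset.subset_union_right
  rwa [pvSaturated family S0] at h1

lemma pvReach_parent (family : List (String × List (String × String))) {x p : String}
    (hp : p ∈ pvParents family x) :
    pvReach family {p} ⊆ pvReach family (pvParF family x) :=
  pvReach_mono family (by rw [Finset.singleton_subset_iff, pvParF, List.mem_toFinset]; exact hp)

lemma pvReach_parent_sub (family : List (String × List (String × String))) {x p : String}
    (hp : p ∈ pvParents family x) : pvReach family {p} ⊆ pvReach family {x} := by
  have h1 : ({p} : Finset String) ⊆ pvExpand family {x} := by
    rw [Finset.singleton_subset_iff]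
    refine Finset.mem_union_right _ (Finset.mem_biUnion.mpr ⟨x, Finset.mem_singleton_self x, ?_⟩)
    rw [pvParF, List.mem_toFinset]; exact hp
  exact (pvReach_mono family h1).trans (le_of_eq (pvReach_expand family _))

lemma pvKey_mem (family : List (String × List (String × String))) {x : String}
    {v : List (String × String)} (hv : (PySem.Dict.mk family).get? x = some v) :
    x ∈ pvKeyF family := by
  have hmem : (x, v) ∈ family := PySem.Dict.mem_items_of_get?_eq_some _ hv
  rw [pvKeyF, List.mem_toFinset]
  exact List.mem_map.mpr ⟨(x, v), hmem, rfl⟩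

lemma pvM_lt {name : String} {family : List (String × List (String × String))}
    (hpre : Pre_get_count_of_ancestors name family) {x p : String} {v : List (String × String)}
    (hx0 : x ≠ "0") (hx : x ∈ pvReach family {name}) (hv : (PySem.Dict.mk family).get? x = some v)
    (hp : p ∈ pvParents family x) : pvM family p < pvM family x := by
  have hsub : (pvReach family {p} ∩ pvKeyF family).erase "0" ⊆
      (pvReach family {x} ∩ pvKeyF family).erase "0" :=
    Finset.erase_subset_erase _ (Finset.inter_subset_inter (pvReach_parent_sub family hp) subset_rfl)
  have hxin : x ∈ (pvReach family {x} ∩ pvKeyF family).erase "0" :=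
    Finset.mem_erase.mpr ⟨hx0, Finset.mem_inter.mpr
      ⟨pvReach_self family _ (Finset.mem_singleton_self x), pvKey_mem family hv⟩⟩
  have hxout : x ∉ (pvReach family {p} ∩ pvKeyF family).erase "0" := by
    intro hin
    exact ((hpre x hx).resolve_left hx0).2
      (pvReach_parent family hp (Finset.mem_inter.mp (Finset.mem_of_mem_erase hin)).1)
  exact Finset.card_lt_card (Finset.ssubset_iff_of_subset hsub |>.mpr ⟨x, hxin, hxout⟩)

lemma pvGoA_succ_key (family : List (String × List (String × String))) (f : Nat) (x : String)
    (v : List (String × String)) (hx0 : x ≠ "0")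
    (hv : (PySem.Dict.mk family).get? x = some v) :
    pvGoA family (f + 1) x =
      1 + pvGoA family f (((PySem.Dict.mk v).get? "father").getD "0")
        + pvGoA family f (((PySem.Dict.mk v).get? "mother").getD "0") := by
  simp only [pvGoA, if_neg hx0, hv]

lemma pvStable {name : String} {family : List (String × List (String × String))}
    (hpre : Pre_get_count_of_ancestors name family) :
    ∀ k x f g, x ∈ pvReach family {name} → pvM family x ≤ k → k < f → k < g →
      pvGoA family f x = pvGoA family g x := by
  intro k
  induction k using Nat.strong_induction_on with
  | _ k IH =>
    intro x f g hx hm hf hg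
    obtain ⟨f', rfl⟩ : ∃ f', f = f' + 1 := ⟨f - 1, by omega⟩
    obtain ⟨g', rfl⟩ : ∃ g', g = g' + 1 := ⟨g - 1, by omega⟩
    by_cases hx0 : x = "0"
    · simp [pvGoA, hx0]
    cases hv : (PySem.Dict.mk family).get? x with
    | none => simp [pvGoA, hx0, hv]
    | some v =>
      have hfa : ((PySem.Dict.mk v).get? "father").getD "0" ∈ pvParents family x := by
        simp [pvParents, hx0, hv]
      have hmo : ((PySem.Dict.mk v).get? "mother").getD "0" ∈ pvParents family x := by
        simp [pvParents, hx0, hv]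
      have hfaR := pvParF_subset_reach family hx (by rw [pvParF, List.mem_toFinset]; exact hfa)
      have hmoR := pvParF_subset_reach family hx (by rw [pvParF, List.mem_toFinset]; exact hmo)
      have h1 := pvM_lt hpre hx0 hx hv hfa
      have h2 := pvM_lt hpre hx0 hx hv hmo
      simp only [pvGoA, if_neg hx0, hv]
      rw [IH (pvM family (((PySem.Dict.mk v).get? "father").getD "0")) (by omega) _ f' g' hfaR
            le_rfl (by omega) (by omega),
          IH (pvM family (((PySem.Dict.mk v).get? "mother").getD "0")) (by omega) _ f' g' hmoR
            le_rfl (by omega) (by omega)]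

lemma pvM_le_len (family : List (String × List (String × String))) (x : String) :
    pvM family x ≤ family.length := by
  refine (Finset.card_le_card ((Finset.erase_subset _ _).trans Finset.inter_subset_right)).trans ?_
  refine (List.toFinset_card_le _).trans ?_
  simp

lemma pvCnt_unfold {name : String} {family : List (String × List (String × String))}
    (hpre : Pre_get_count_of_ancestors name family) {x : String} {v : List (String × String)}
    (hx : x ∈ pvReach family {name}) (hx0 : x ≠ "0")
    (hv : (PySem.Dict.mk family).get? x = some v) :
    pvGoA family (family.length + 1) x =
      1 + pvGoA family (family.length + 1) (((PySem.Dict.mk v).get? "father").getD "0")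
        + pvGoA family (family.length + 1) (((PySem.Dict.mk v).get? "mother").getD "0") := by
  have hfa : ((PySem.Dict.mk v).get? "father").getD "0" ∈ pvParents family x := by
    simp [pvParents, hx0, hv]
  have hmo : ((PySem.Dict.mk v).get? "mother").getD "0" ∈ pvParents family x := by
    simp [pvParents, hx0, hv]
  have hfaR := pvParF_subset_reach family hx (by rw [pvParF, List.mem_toFinset]; exact hfa)
  have hmoR := pvParF_subset_reach family hx (by rw [pvParF, List.mem_toFinset]; exact hmo)
  have h1 := pvM_lt hpre hx0 hx hv hfa
  have h2 := pvM_lt hpre hx0 hx hv hmo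
  have hxl := pvM_le_len family x
  rw [pvGoA_succ_key family family.length x v hx0 hv]
  rw [pvStable hpre (pvM family (((PySem.Dict.mk v).get? "father").getD "0")) _
        family.length (family.length + 1) hfaR le_rfl (by omega) (by omega),
      pvStable hpre (pvM family (((PySem.Dict.mk v).get? "mother").getD "0")) _
        family.length (family.length + 1) hmoR le_rfl (by omega) (by omega)]

-- ---- generic loop-shape lemmas for the break encoding ----

lemma pvFoldl_const_iterate {α β : Type} (f : α → α) :
    ∀ (L : List β) (c : α), L.foldl (fun c _ => f c) c = f^[L.length] c := by
  intro L
  induction L with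
  | nil => intro c; rfl
  | cons b L IH =>
    intro c
    simp only [List.foldl_cons, List.length_cons, Function.iterate_succ_apply]
    exact IH (f c)

lemma pvFix_foldl {α β : Type} (f : α → α) {c : α} (h : f c = c) :
    ∀ (L : List β), L.foldl (fun c _ => f c) c = c := by
  intro L
  induction L with
  | nil => rfl
  | cons b L IH => simp only [List.foldl_cons, h]; exact IH

lemma pvBreak_done {α β : Type} [DecidableEq α] (f : α → α) :
    ∀ (L : List β) (c : α), L.foldl (fun st _ => pvBreakStep f st) (c, true) = (c, true) := by
  intro L
  induction L with
  | nil => intro c; rfl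
  | cons b L IH =>
    intro c
    simp only [List.foldl_cons, pvBreakStep, if_pos]
    exact IH c

lemma pvBreak_eq {α β : Type} [DecidableEq α] (f : α → α) :
    ∀ (L : List β) (c : α),
      (L.foldl (fun st _ => pvBreakStep f st) (c, false)).1 = L.foldl (fun c _ => f c) c := by
  intro L
  induction L with
  | nil => intro c; rfl
  | cons b L IH =>
    intro c
    simp only [List.foldl_cons]
    by_cases h : f c = c
    · rw [show pvBreakStep f (c, false) = (c, true) by simp [pvBreakStep, h],
        pvBreak_done f L c, h, pvFix_foldl f h L]
    · rw [show pvBreakStep f (c, false) = (f c, false) by simp [pvBreakStep, h]]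
      exact IH (f c)

-- ---- B-side basic lemmas ----

lemma pvGoA_zero (family : List (String × List (String × String))) (f : Nat) :
    pvGoA family (f + 1) "0" = 0 := by simp [pvGoA]

lemma pvGet_none_iff (family : List (String × List (String × String))) (x : String) :
    (PySem.Dict.mk family).get? x = none ↔ x ∉ family.map Prod.fst := by
  induction family with
  | nil => simp [PySem.Dict.get?]
  | cons kv rest IH =>
    rw [PySem.Dict.get?_mk_cons]
    by_cases h : kv.1 = x
    · simp [h]
    · simp only [List.map_cons, List.mem_cons]
      rw [if_neg (by simp [h]), IH]
      constructor
      · intro hn hm; rcases hm with hm | hm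
        · exact h hm.symm
        · exact hn hm
      · intro hn; exact fun hm => hn (Or.inr hm)

lemma pvContains_iff (family : List (String × List (String × String))) (x : String) :
    (PySem.Dict.mk family).contains x = true ↔ x ∈ family.map Prod.fst := by
  rw [PySem.Dict.contains_eq_isSome_get?]
  cases hg : (PySem.Dict.mk family).get? x with
  | none => simpa using (pvGet_none_iff family x).mp hg
  | some v =>
    simp only [Option.isSome_some, true_iff]
    by_contra hm
    rw [(pvGet_none_iff family x).mpr hm] at hg
    exact absurd hg (by simp)

lemma pvGoA_none (family : List (String × List (String × String))) (f : Nat) (x : String)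
    (h : (PySem.Dict.mk family).get? x = none) : pvGoA family (f + 1) x = 0 := by
  simp only [pvGoA, h]
  split <;> rfl

-- ---- phase 1: reachable-key set ----

lemma pvAdd_prefix (R : List String) (q : String) : R <+: PySem.Set.add R q := by
  unfold PySem.Set.add
  split
  · exact List.prefix_refl R
  · exact List.prefix_append R [q]

lemma pvRUpd_prefix (family : List (String × List (String × String))) (R : List String)
    (k : String) : R <+: pvRUpd family R k := by
  unfold pvRUpd
  split
  · rename_i hkR
    clear hkR
    generalize [((PySem.Dict.mk (((PySem.Dict.mk family).get? k).getD [])).get? "father").getD "0",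
      ((PySem.Dict.mk (((PySem.Dict.mk family).get? k).getD [])).get? "mother").getD "0"] = l
    induction l generalizing R with
    | nil => exact List.prefix_refl R
    | cons q l IH =>
      simp only [List.foldl_cons]
      refine List.IsPrefix.trans ?_ (IH _)
      split
      · exact pvAdd_prefix R q
      · exact List.prefix_refl R
  · exact List.prefix_refl R

lemma pvRPass_prefix (family : List (String × List (String × String))) (R : List String) :
    R <+: pvRPass family R := by
  unfold pvRPass
  generalize pvKeysD family = l
  induction l generalizing R with
  | nil => exact List.prefix_refl R
  | cons k l IH =>
    simp only [List.foldl_cons]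
    exact (pvRUpd_prefix family R k).trans (IH _)

lemma pvRUpd_ok (family : List (String × List (String × String))) (R : List String)
    (k : String) (h : pvROk family R) : pvROk family (pvRUpd family R k) := by
  unfold pvRUpd
  split
  · rename_i hkR
    clear hkR
    generalize [((PySem.Dict.mk (((PySem.Dict.mk family).get? k).getD [])).get? "father").getD "0",
      ((PySem.Dict.mk (((PySem.Dict.mk family).get? k).getD [])).get? "mother").getD "0"] = l
    induction l generalizing R with
    | nil => exact h
    | cons q l IH =>
      simp only [List.foldl_cons]
      refine IH _ ?_
      split
      · rename_i hq
        refine ⟨PySem.Set.nodup_add _ q h.1, ?_⟩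
        intro x hx
        rcases (PySem.Set.mem_add _ _ _).mp hx with hx | hx
        · exact h.2 x hx
        · exact ⟨hx ▸ hq.1, hx ▸ (pvContains_iff family q).mp hq.2⟩
      · exact h
  · exact h

lemma pvRPass_ok (family : List (String × List (String × String))) (R : List String)
    (h : pvROk family R) : pvROk family (pvRPass family R) := by
  unfold pvRPass
  generalize pvKeysD family = l
  induction l generalizing R with
  | nil => exact h
  | cons k l IH =>
    simp only [List.foldl_cons]
    exact IH _ (pvRUpd_ok family R k h)

lemma pvFoldR_prefix (family : List (String × List (String × String))) :
    ∀ (l : List String) (R : List String), R <+: l.foldl (pvRUpd family) R := by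
  intro l
  induction l with
  | nil => intro R; exact List.prefix_refl R
  | cons k l IH =>
    intro R
    simp only [List.foldl_cons]
    exact (pvRUpd_prefix family R k).trans (IH _)

-- processing a member key adds its (non-'0', key) parents
lemma pvRUpd_adds (family : List (String × List (String × String))) (R : List String)
    {y : String} (hy : y ∈ R) {q : String} (hq : q ∈ pvParents family y) (hq0 : q ≠ "0")
    (hqk : q ∈ family.map Prod.fst) : q ∈ pvRUpd family R y := by
  unfold pvParents at hq
  by_cases hy0 : y = "0"
  · rw [if_pos hy0] at hq; simp at hq
  rw [if_neg hy0] at hq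
  cases hv : (PySem.Dict.mk family).get? y with
  | none => rw [hv] at hq; simp at hq
  | some v =>
    rw [hv] at hq
    unfold pvRUpd
    rw [if_pos hy, hv]
    simp only [Option.getD_some, List.foldl_cons, List.foldl_nil]
    have hcond : ∀ (S : List String) (z : String), z = q → q ∈
        (if z ≠ "0" ∧ (PySem.Dict.mk family).contains z then PySem.Set.add S z else S) := by
      intro S z hz
      rw [hz, if_pos ⟨hq0, (pvContains_iff family q).mpr hqk⟩]
      exact (PySem.Set.mem_add _ _ _).mpr (Or.inr rfl)
    have hkeep : ∀ (S : List String) (z : String), q ∈ S → q ∈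
        (if z ≠ "0" ∧ (PySem.Dict.mk family).contains z then PySem.Set.add S z else S) := by
      intro S z hS
      split
      · exact (PySem.Set.mem_add _ _ _).mpr (Or.inl hS)
      · exact hS
    rcases List.mem_pair.mp hq with hqf | hqm
    · exact hkeep _ _ (hcond _ _ hqf.symm)
    · exact hcond _ _ hqm.symm

lemma pvFold_adds (family : List (String × List (String × String))) :
    ∀ (l : List String) (R : List String) {y : String}, y ∈ l → y ∈ R →
      ∀ {q : String}, q ∈ pvParents family y → q ≠ "0" → q ∈ family.map Prod.fst →
      q ∈ l.foldl (pvRUpd family) R := by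
  intro l
  induction l with
  | nil => intro R y hy; simp at hy
  | cons k l IH =>
    intro R y hy hyR q hq hq0 hqk
    simp only [List.foldl_cons]
    by_cases hky : k = y
    · subst hky
      exact (pvFoldR_prefix family l _).subset (pvRUpd_adds family R hyR hq hq0 hqk)
    · rcases List.mem_cons.mp hy with h | h
      · exact absurd h.symm hky
      · exact IH _ h ((pvRUpd_prefix family R k).subset hyR) hq hq0 hqk

-- closure of a fixed point of the pass
def pvRClosed (family : List (String × List (String × String))) (R : List String) : Prop :=
  ∀ y ∈ R, ∀ q ∈ pvParents family y, q ≠ "0" → q ∈ family.map Prod.fst → q ∈ R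

lemma pvClosed_of_fix (family : List (String × List (String × String))) (R : List String)
    (hok : pvROk family R) (hfix : pvRPass family R = R) : pvRClosed family R := by
  intro y hy q hq hq0 hqk
  have hyk : y ∈ pvKeysD family :=
    (PySem.List.mem_dedup _ _).mpr ((hok.2 y hy).2)
  have := pvFold_adds family (pvKeysD family) R hyk hy hq hq0 hqk
  rwa [show (pvKeysD family).foldl (pvRUpd family) R = pvRPass family R from rfl, hfix] at this

lemma pvROk_len (family : List (String × List (String × String))) (R : List String)
    (hok : pvROk family R) : R.length ≤ (pvKeysD family).length := by
  have h1 : R.toFinset.card = R.length := List.toFinset_card_of_nodup hok.1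
  have h2 : R.toFinset ⊆ (pvKeysD family).toFinset := by
    intro a ha
    rw [List.mem_toFinset] at ha ⊢
    exact (PySem.List.mem_dedup _ _).mpr ((hok.2 a ha).2)
  calc R.length = R.toFinset.card := h1.symm
    _ ≤ (pvKeysD family).toFinset.card := Finset.card_le_card h2
    _ ≤ (pvKeysD family).length := List.toFinset_card_le _

lemma pvROk_iter (family : List (String × List (String × String))) (R0 : List String)
    (h : pvROk family R0) (n : Nat) : pvROk family ((pvRPass family)^[n] R0) := by
  induction n with
  | zero => exact h
  | succ n IH => rw [Function.iterate_succ_apply']; exact pvRPass_ok family _ IH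

lemma pvRGrow (family : List (String × List (String × String))) (R0 : List String) :
    ∀ k, pvRPass family ((pvRPass family)^[k] R0) = (pvRPass family)^[k] R0 ∨
      R0.length + k ≤ ((pvRPass family)^[k] R0).length := by
  intro k
  induction k with
  | zero => right; simp
  | succ k IH =>
    rcases IH with h | h
    · left; rw [Function.iterate_succ_apply', h, h]
    · by_cases hf : pvRPass family ((pvRPass family)^[k] R0) = (pvRPass family)^[k] R0
      · left; rw [Function.iterate_succ_apply', hf, hf]
      · right
        have hpre := pvRPass_prefix family ((pvRPass family)^[k] R0)
        have hne : ((pvRPass family)^[k] R0).length ≠ (pvRPass family ((pvRPass family)^[k] R0)).length :=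
          fun he => hf (hpre.eq_of_length he).symm
        have hle := hpre.length_le
        rw [Function.iterate_succ_apply']
        omega

lemma pvRFix (family : List (String × List (String × String))) (R0 : List String)
    (hok : pvROk family R0) (hne : R0 ≠ []) :
    pvRPass family ((pvRPass family)^[(pvKeysD family).length] R0)
      = (pvRPass family)^[(pvKeysD family).length] R0 := by
  rcases pvRGrow family R0 (pvKeysD family).length with h | h
  · exact h
  · exfalso
    have h1 := pvROk_len family _ (pvROk_iter family R0 hok (pvKeysD family).length)
    have h2 : 1 ≤ R0.length := by
      cases R0 with
      | nil => exact absurd rfl hne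
      | cons a l => simp
    omega

lemma pvIterR_prefix (family : List (String × List (String × String))) (R0 : List String) :
    ∀ n, R0 <+: (pvRPass family)^[n] R0 := by
  intro n
  induction n with
  | zero => exact List.prefix_refl R0
  | succ n IH =>
    rw [Function.iterate_succ_apply']
    exact IH.trans (pvRPass_prefix family _)

-- a parent list is nonempty only for a non-'0' key
lemma pvParents_shape (family : List (String × List (String × String))) (y q : String)
    (hq : q ∈ pvParents family y) : y ≠ "0" ∧ y ∈ family.map Prod.fst := by
  unfold pvParents at hq
  by_cases hy0 : y = "0"
  · rw [if_pos hy0] at hq; simp at hq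
  rw [if_neg hy0] at hq
  cases hv : (PySem.Dict.mk family).get? y with
  | none => rw [hv] at hq; simp at hq
  | some v =>
    refine ⟨hy0, ?_⟩
    by_contra hm
    rw [(pvGet_none_iff family y).mpr hm] at hv
    exact absurd hv (by simp)

lemma pvRComplete (name : String) (family : List (String × List (String × String)))
    (R : List String) (hclosed : pvRClosed family R) (hseed : name ∈ R) :
    ∀ p, ∀ x ∈ (pvExpand family)^[p] ({name} : Finset String), x ≠ "0" →
      x ∈ family.map Prod.fst → x ∈ R := by
  intro p
  induction p with
  | zero =>
    intro x hx _ _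
    rw [Function.iterate_zero_apply, Finset.mem_singleton] at hx
    exact hx ▸ hseed
  | succ p IH =>
    intro x hx hx0 hxk
    rw [Function.iterate_succ_apply'] at hx
    rcases Finset.mem_union.mp hx with h | h
    · exact IH x h hx0 hxk
    · obtain ⟨y, hyS, hxy⟩ := Finset.mem_biUnion.mp h
      rw [pvParF, List.mem_toFinset] at hxy
      obtain ⟨hy0, hyk⟩ := pvParents_shape family y x hxy
      exact hclosed y (IH y hyS hy0 hyk) x hxy hx0 hxk

lemma pvRPass_nil (family : List (String × List (String × String))) :
    pvRPass family [] = [] := by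
  unfold pvRPass
  generalize pvKeysD family = l
  induction l with
  | nil => rfl
  | cons k l IH => simpa [pvRUpd] using IH

lemma pvIterR_nil (family : List (String × List (String × String))) (n : Nat) :
    (pvRPass family)^[n] [] = [] := by
  induction n with
  | zero => rfl
  | succ n IH => rw [Function.iterate_succ_apply', IH, pvRPass_nil]

-- ---- phase 2: counting passes ----

lemma pvUpd_val {name : String} {family : List (String × List (String × String))}
    (hpre : Pre_get_count_of_ancestors name family) {p : Nat} {cnt : PySem.Dict String Int}
    {k : String} (hnk : pvNK family cnt) (hgood : pvGood name family p cnt)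
    (hk : k ∈ pvReach family {name}) (hk0 : k ≠ "0") (hkm : pvM family k ≤ p + 1)
    {v : List (String × String)} (hv : (PySem.Dict.mk family).get? k = some v) :
    (pvUpd family cnt k).getD k 0 = pvGoA family (family.length + 1) k := by
  have hval : ∀ q, q ∈ pvParents family k →
      (if q ≠ "0" then cnt.getD q 0 else 0) = pvGoA family (family.length + 1) q := by
    intro q hq
    by_cases hq0 : q = "0"
    · subst hq0; rw [if_neg (by simp), pvGoA_zero]
    · rw [if_pos hq0]
      have hqR : q ∈ pvReach family {name} :=
        pvParF_subset_reach family hk (by rw [pvParF, List.mem_toFinset]; exact hq)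
      have hqm : pvM family q < pvM family k := pvM_lt hpre hk0 hk hv hq
      cases hg : (PySem.Dict.mk family).get? q with
      | none =>
        rw [PySem.Dict.getD_of_get?_eq_none _ 0 (hnk q hg), pvGoA_none family _ q hg]
      | some w =>
        exact hgood q hqR hq0 (by omega)
  have hfa : ((PySem.Dict.mk v).get? "father").getD "0" ∈ pvParents family k := by
    simp [pvParents, hk0, hv]
  have hmo : ((PySem.Dict.mk v).get? "mother").getD "0" ∈ pvParents family k := by
    simp [pvParents, hk0, hv]
  show (cnt.insert k _).getD k 0 = _
  rw [PySem.Dict.getD_insert_self]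
  simp only [hv, Option.getD_some]
  rw [hval _ hfa, hval _ hmo, ← pvCnt_unfold hpre hk hk0 hv]

lemma pvStep_inv {name : String} {family : List (String × List (String × String))}
    (hpre : Pre_get_count_of_ancestors name family) {p : Nat} {cnt : PySem.Dict String Int}
    {k : String} {l : List String} (hkmem : k ∈ family.map Prod.fst)
    (h : pvInv name family p cnt (k :: l)) : pvInv name family p (pvUpd family cnt k) l := by
  obtain ⟨hnk, hgood, hrest⟩ := h
  obtain ⟨v, hv⟩ : ∃ v, (PySem.Dict.mk family).get? k = some v := by
    cases hg : (PySem.Dict.mk family).get? k with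
    | none => exact absurd ((pvGet_none_iff family k).mp hg) (by simp [hkmem])
    | some v => exact ⟨v, rfl⟩
  have hins : ∀ x, x ≠ k → (pvUpd family cnt k).getD x 0 = cnt.getD x 0 := by
    intro x hx
    show (cnt.insert k _).getD x 0 = _
    rw [PySem.Dict.getD_insert_of_ne _ _ _ hx]
  refine ⟨?_, ?_, ?_⟩
  · intro x hx
    have hxk : x ≠ k := fun he => by rw [he, hv] at hx; exact absurd hx (by simp)
    show (cnt.insert k _).get? x = none
    rw [PySem.Dict.get?_insert_of_ne _ _ hxk]
    exact hnk x hx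
  · intro x hxR hx0 hxm
    by_cases hxk : x = k
    · subst hxk
      exact pvUpd_val hpre hnk hgood hxR hx0 (by omega) hv
    · rw [hins x hxk]; exact hgood x hxR hx0 hxm
  · intro x hxR hx0 hxm hxl
    by_cases hxk : x = k
    · subst hxk
      exact pvUpd_val hpre hnk hgood hxR hx0 hxm hv
    · rw [hins x hxk]
      exact hrest x hxR hx0 hxm (by simp [hxk, hxl])

lemma pvFold_inv {name : String} {family : List (String × List (String × String))}
    (hpre : Pre_get_count_of_ancestors name family) {p : Nat} :
    ∀ (l : List String) (cnt : PySem.Dict String Int), (∀ k ∈ l, k ∈ family.map Prod.fst) →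
      pvInv name family p cnt l → pvInv name family p (l.foldl (pvUpd family) cnt) [] := by
  intro l
  induction l with
  | nil => intro cnt _ h; exact h
  | cons k l IH =>
    intro cnt hmem h
    exact IH _ (fun q hq => hmem q (by simp [hq]))
      (pvStep_inv hpre (hmem k (by simp)) h)

lemma pvGuard_filter (family : List (String × List (String × String))) (R : List String) :
    ∀ (l : List String) (cnt : PySem.Dict String Int),
      l.foldl (fun c k => if k ∈ R then pvUpd family c k else c) cnt
        = (l.filter (fun k => decide (k ∈ R))).foldl (pvUpd family) cnt := by
  intro l
  induction l with
  | nil => intro cnt; rfl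
  | cons k l IH =>
    intro cnt
    simp only [List.foldl_cons, List.filter_cons]
    by_cases h : k ∈ R
    · rw [if_pos h, if_pos (by simpa using h)]
      exact IH _
    · rw [if_neg h, if_neg (by simpa using h)]
      exact IH _

lemma pvCPass_good {name : String} {family : List (String × List (String × String))}
    (hpre : Pre_get_count_of_ancestors name family) {R : List String}
    (hcomp : ∀ x ∈ pvReach family {name}, x ≠ "0" → x ∈ family.map Prod.fst → x ∈ R)
    {p : Nat} {cnt : PySem.Dict String Int}
    (hnk : pvNK family cnt) (hgood : pvGood name family p cnt) :
    pvNK family (pvCPass family R cnt) ∧ pvGood name family (p + 1) (pvCPass family R cnt) := by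
  have hrw : pvCPass family R cnt
      = ((pvKeysD family).filter (fun k => decide (k ∈ R))).foldl (pvUpd family) cnt :=
    pvGuard_filter family R (pvKeysD family) cnt
  have hinit : pvInv name family p cnt ((pvKeysD family).filter (fun k => decide (k ∈ R))) := by
    refine ⟨hnk, hgood, ?_⟩
    intro x hxR hx0 hxm hxl
    cases hg : (PySem.Dict.mk family).get? x with
    | none =>
      rw [PySem.Dict.getD_of_get?_eq_none _ 0 (hnk x hg), pvGoA_none family _ x hg]
    | some v =>
      exfalso
      have hxk : x ∈ family.map Prod.fst := by
        by_contra hm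
        rw [(pvGet_none_iff family x).mpr hm] at hg
        exact absurd hg (by simp)
      exact hxl (List.mem_filter.mpr ⟨(PySem.List.mem_dedup _ _).mpr hxk,
        by simpa using hcomp x hxR hx0 hxk⟩)
  have hres := pvFold_inv hpre _ cnt
    (fun k hk => (PySem.List.mem_dedup _ _).mp (List.mem_filter.mp hk).1) hinit
  rw [hrw]
  exact ⟨hres.1, fun x hxR hx0 hxm => hres.2.2 x hxR hx0 hxm (by simp)⟩

lemma pvCPasses {name : String} {family : List (String × List (String × String))}
    (hpre : Pre_get_count_of_ancestors name family) {R : List String}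
    (hcomp : ∀ x ∈ pvReach family {name}, x ≠ "0" → x ∈ family.map Prod.fst → x ∈ R) :
    ∀ (n : Nat) (cnt : PySem.Dict String Int) (p : Nat),
      pvNK family cnt → pvGood name family p cnt →
      pvNK family ((pvCPass family R)^[n] cnt) ∧
        pvGood name family (p + n) ((pvCPass family R)^[n] cnt) := by
  intro n
  induction n with
  | zero => intro cnt p h1 h2; exact ⟨h1, h2⟩
  | succ n IH =>
    intro cnt p h1 h2
    have hp := pvCPass_good hpre hcomp h1 h2
    have hh := IH (pvCPass family R cnt) (p + 1) hp.1 hp.2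
    rw [Function.iterate_succ_apply]
    refine ⟨hh.1, ?_⟩
    have he : p + (n + 1) = p + 1 + n := by omega
    rw [he]
    exact hh.2

lemma pvNK_empty (family : List (String × List (String × String))) :
    pvNK family PySem.Dict.empty := by
  intro x _; exact PySem.Dict.get?_empty x

lemma pvGood_empty (name : String) (family : List (String × List (String × String))) :
    pvGood name family 0 PySem.Dict.empty := by
  intro x hxR hx0 hxm
  cases hg : (PySem.Dict.mk family).get? x with
  | none => rw [PySem.Dict.getD_empty, pvGoA_none family _ x hg]
  | some v =>
    exfalso
    have hxin : x ∈ (pvReach family {x} ∩ pvKeyF family).erase "0" :=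
      Finset.mem_erase.mpr ⟨hx0, Finset.mem_inter.mpr
        ⟨pvReach_self family _ (Finset.mem_singleton_self x), pvKey_mem family hg⟩⟩
    have : 0 < pvM family x := Finset.card_pos.mpr ⟨x, hxin⟩
    omega

lemma pvM_le_R (name : String) (family : List (String × List (String × String)))
    (R : List String) (hok : pvROk family R)
    (hcomp : ∀ x ∈ pvReach family {name}, x ≠ "0" → x ∈ family.map Prod.fst → x ∈ R) :
    pvM family name ≤ R.length := by
  have hsub : (pvReach family {name} ∩ pvKeyF family).erase "0" ⊆ R.toFinset := by
    intro z hz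
    obtain ⟨hz0, hzi⟩ := Finset.mem_erase.mp hz
    obtain ⟨hzr, hzk⟩ := Finset.mem_inter.mp hzi
    rw [List.mem_toFinset]
    exact hcomp z hzr hz0 (by rwa [pvKeyF, List.mem_toFinset] at hzk)
  calc pvM family name ≤ R.toFinset.card := Finset.card_le_card hsub
    _ = R.length := List.toFinset_card_of_nodup hok.1

theorem pvWitness_ok :
    Dom_get_count_of_ancestors pvWitness_get_count_of_ancestors.1 pvWitness_get_count_of_ancestors.2 ∧
    Pre_get_count_of_ancestors pvWitness_get_count_of_ancestors.1 pvWitness_get_count_of_ancestors.2 := by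
  constructor <;> decide

-- ===== VERDICT (by name: the statement is the Claim_ definition above) =====
theorem get_count_of_ancestors_spec : Claim_equal_get_count_of_ancestors := by
  intro name family _hdom hpre
  unfold Spec_get_count_of_ancestors get_count_of_ancestors get_count_of_ancestors_alt
  by_cases h0 : name = "0"
  · subst h0
    rw [if_pos rfl, pvGoA_zero]
  · rw [if_neg h0]
    have hRrw : pvReachB name family
        = (pvRPass family)^[(pvKeysD family).length] (pvSeed name family) := by
      unfold pvReachB
      rw [pvBreak_eq, pvFoldl_const_iterate, PySem.List.length_pyRange_one]
      simp
    cases hv : (PySem.Dict.mk family).get? name with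
    | none =>
      have hseed : pvSeed name family = [] := by
        unfold pvSeed
        rw [if_neg]
        rintro ⟨-, hc⟩
        rw [PySem.Dict.contains_eq_isSome_get?, hv] at hc
        exact absurd hc (by simp)
      have hR : pvReachB name family = [] := by
        rw [hRrw, hseed, pvIterR_nil]
      rw [hR]
      have : (PySem.List.pyRange 0 (([] : List String).length : Int) 1) = [] := by
        simp [PySem.List.pyRange_one_eq_nil]
      rw [this]
      simp only [List.foldl_nil]
      rw [PySem.Dict.getD_empty, pvGoA_none family _ name hv]
    | some v =>
      have hseed : pvSeed name family = [name] := by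
        unfold pvSeed
        rw [if_pos ⟨h0, by rw [PySem.Dict.contains_eq_isSome_get?, hv]; rfl⟩]
      have hok0 : pvROk family (pvSeed name family) := by
        rw [hseed]
        refine ⟨List.nodup_singleton name, ?_⟩
        intro x hx
        rw [List.mem_singleton] at hx
        subst hx
        refine ⟨h0, ?_⟩
        by_contra hm
        rw [(pvGet_none_iff family x).mpr hm] at hv
        exact absurd hv (by simp)
      have hokR : pvROk family (pvReachB name family) := by
        rw [hRrw]; exact pvROk_iter family _ hok0 _
      have hfix : pvRPass family (pvReachB name family) = pvReachB name family := by
        rw [hRrw]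
        exact pvRFix family _ hok0 (by rw [hseed]; simp)
      have hclosed : pvRClosed family (pvReachB name family) :=
        pvClosed_of_fix family _ hokR hfix
      have hnameR : name ∈ pvReachB name family := by
        rw [hRrw]
        exact (pvIterR_prefix family _ _).subset (by rw [hseed]; simp)
      have hcomp : ∀ x ∈ pvReach family {name}, x ≠ "0" → x ∈ family.map Prod.fst →
          x ∈ pvReachB name family :=
        fun x hx hx0 hxk => pvRComplete name family _ hclosed hnameR (pvN family) x hx hx0 hxk
      have hcnt : ((PySem.List.pyRange 0 ((pvReachB name family).length : Int) 1).foldl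
          (fun st _ => pvBreakStep (pvCPass family (pvReachB name family)) st)
          (PySem.Dict.empty, false)).1
          = (pvCPass family (pvReachB name family))^[(pvReachB name family).length]
              PySem.Dict.empty := by
        rw [pvBreak_eq, pvFoldl_const_iterate, PySem.List.length_pyRange_one]
        simp
      rw [hcnt]
      have hpasses := pvCPasses hpre hcomp (pvReachB name family).length
        PySem.Dict.empty 0 (pvNK_empty family) (pvGood_empty name family)
      exact (hpasses.2 name (pvReach_self family _ (Finset.mem_singleton_self name)) h0
        (by simpa using pvM_le_R name family _ hokR hcomp)).symm
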